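-- pv_equiv track=rewrite | github.com/mohityeole7/Burnout-Recovery-Planner | agents.py | _extract_research_topics
-- ===== SOURCE A (Python) =====
-- def _extract_sections(user_profile: str) -> dict[str, str]:
--     sections: dict[str, str] = {}
--     for line in user_profile.splitlines():
--         if ":" not in line:
--             continue
--         key, value = line.split(":", 1)
--         sections[key.strip().lower()] = value.strip()
--     return sections
--
-- def _extract_research_topics(user_profile: str) -> list[str]:
--     sections = _extract_sections(user_profile)
--     triggers = sections.get("stress triggers", "")
--     topics = [chunk.strip() for chunk in triggers.split(",") if chunk.strip()]
--     if not topics: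
--         topics = [
--             "burnout recovery routines",
--             "sleep recovery habits",
--             "stress reduction micro habits",
--         ]
--     return topics[:3]
-- ===== SOURCE B (Python) =====
-- def _extract_research_topics(user_profile: str) -> list[str]:
--     # The dict lookup in the original keeps the LAST 'stress triggers' line;
--     # scanning the lines back-to-front, the FIRST match is that same line,
--     # so a lazy reverse search with early exit is equivalent.
--     triggers = next(
--         (value.strip()
--          for line in reversed(user_profile.splitlines())
--          for key, sep, value in (line.partition(":"),)
--          if sep and key.strip().lower() == "stress triggers"),
--         "",
--     )
--     topics = [chunk.strip() for chunk in triggers.split(",") if chunk.strip()][:3]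
--     return topics or [
--         "burnout recovery routines",
--         "sleep recovery habits",
--         "stress reduction micro habits",
--     ]
-- ===== Notes on version B (the rewrite author's own statement) =====
-- stated objective: alternative
-- what changed: Instead of building a dict of all sections and looking the field up, B searches the lines back-to-front with a lazy generator and stops at the first 'stress triggers' line (which is the dict's last-wins value).
import Mathlib
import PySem

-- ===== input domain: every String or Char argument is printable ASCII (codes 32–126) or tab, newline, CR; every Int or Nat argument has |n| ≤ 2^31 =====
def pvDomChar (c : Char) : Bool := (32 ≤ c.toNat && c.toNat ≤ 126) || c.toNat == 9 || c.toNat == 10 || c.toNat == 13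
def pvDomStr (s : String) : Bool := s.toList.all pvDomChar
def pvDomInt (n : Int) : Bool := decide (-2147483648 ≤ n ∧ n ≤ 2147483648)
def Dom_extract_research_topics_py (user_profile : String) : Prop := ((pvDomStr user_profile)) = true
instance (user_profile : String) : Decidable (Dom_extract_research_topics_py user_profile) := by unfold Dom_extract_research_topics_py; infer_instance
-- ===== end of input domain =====

-- B replaces A's dict of all sections by a lazy back-to-front search stopping at the first
-- (= last-wins) 'stress triggers' line (alternative decomposition; return value only).

-- ===== PORT A =====

-- s.split(":", 1): split at the FIRST ':' (exact when ':' occurs in the list; A only calls it under that guard)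
def pvSplit1Colon : List Char → List Char × List Char
  | [] => ([], [])
  | c :: rest =>
    if c = ':' then ([], rest)
    else
      let p := pvSplit1Colon rest
      (c :: p.1, p.2)

-- literal port of _extract_sections
def extract_sections_py (user_profile : String) : PySem.Dict String String :=
  (PySem.Str.splitlines user_profile).foldl
    (fun sections line =>
      if PySem.Str.isIn ":" line then
        let p := pvSplit1Colon line.toList
        sections.insert (PySem.Str.lower (PySem.Str.strip (String.ofList p.1)))
                        (PySem.Str.strip (String.ofList p.2))
      else sections)
    PySem.Dict.empty

def extract_research_topics_py (user_profile : String) : List String :=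
  let sections := extract_sections_py user_profile
  let triggers := sections.getD "stress triggers" ""
  let topics := ((PySem.Str.split? triggers ",").getD []).map PySem.Str.strip
    |>.filter (fun chunk => chunk ≠ "")
  let topics := if topics = [] then
      ["burnout recovery routines", "sleep recovery habits", "stress reduction micro habits"]
    else topics
  PySem.List.slice topics none (some 3)

-- ===== PORT B =====

-- line.partition(":"): none if ':' absent (empty sep), else (before, after) around the first ':'
def pvPartitionColon : List Char → Option (List Char × List Char)
  | [] => none
  | c :: rest =>
    if c = ':' then some ([], rest)
    else (pvPartitionColon rest).map (fun p => (c :: p.1, p.2))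

-- the lazy generator + next(..., ""): first matching line of the given (reversed) list, else none
def pvFindTrig : List String → Option String
  | [] => none
  | line :: rest =>
    match pvPartitionColon line.toList with
    | none => pvFindTrig rest
    | some p =>
      if PySem.Str.lower (PySem.Str.strip (String.ofList p.1)) = "stress triggers" then
        some (PySem.Str.strip (String.ofList p.2))
      else pvFindTrig rest

def extract_research_topics_py_alt (user_profile : String) : List String :=
  let triggers := (pvFindTrig (PySem.Str.splitlines user_profile).reverse).getD ""
  let topics := PySem.List.slice
    (((PySem.Str.split? triggers ",").getD []).map PySem.Str.strip
      |>.filter (fun chunk => chunk ≠ "")) none (some 3)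
  if topics = [] then
    ["burnout recovery routines", "sleep recovery habits", "stress reduction micro habits"]
  else topics

-- ===== PRECONDITION & SPEC =====
def Spec_extract_research_topics_py (user_profile : String) (out : List String) : Prop := out = extract_research_topics_py_alt user_profile
instance (user_profile : String) (out : List String) : Decidable (Spec_extract_research_topics_py user_profile out) := by unfold Spec_extract_research_topics_py; infer_instance

-- ===== CLAIM (what is proved, stated in full; the proofs are below) =====
def Claim_equal_extract_research_topics_py : Prop := ∀ (user_profile : String), Dom_extract_research_topics_py user_profile → Spec_extract_research_topics_py user_profile (extract_research_topics_py user_profile)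

-- ===== LEMMAS AND PROOFS =====

lemma pvPartitionColon_none_iff (l : List Char) :
    pvPartitionColon l = none ↔ ':' ∉ l := by
  induction l with
  | nil => simp [pvPartitionColon]
  | cons c rest ih =>
    by_cases hc : c = ':'
    · subst hc; simp [pvPartitionColon]
    · simp [pvPartitionColon, hc, Option.map_eq_none_iff, ih, Ne.symm hc]

lemma pvPartitionColon_mem (l : List Char) (h : ':' ∈ l) :
    pvPartitionColon l = some (pvSplit1Colon l) := by
  induction l with
  | nil => simp at h
  | cons c rest ih =>
    by_cases hc : c = ':'
    · subst hc; simp [pvPartitionColon, pvSplit1Colon]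
    · have hm : ':' ∈ rest := by
        rcases List.mem_cons.mp h with h1 | h1
        · exact absurd h1.symm hc
        · exact h1
      simp [pvPartitionColon, pvSplit1Colon, hc, ih hm]

lemma isIn_colon (s : String) :
    PySem.Str.isIn ":" s = true ↔ ':' ∈ s.toList := by
  rw [PySem.Str.isIn_iff_infix]
  show [':'] <:+: s.toList ↔ _
  constructor
  · intro hinf; exact hinf.mem (by simp)
  · intro hm
    rcases List.eq_append_cons_of_mem hm with ⟨a, b, heq, -⟩
    exact ⟨a, b, by simp [heq]⟩

-- first match in the concatenation: left part first
lemma pvFindTrig_append_some (a b : List String) (v : String) (h : pvFindTrig a = some v) :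
    pvFindTrig (a ++ b) = some v := by
  induction a with
  | nil => simp [pvFindTrig] at h
  | cons line rest ih =>
    simp only [List.cons_append, pvFindTrig] at h ⊢
    cases hp : pvPartitionColon line.toList with
    | none => rw [hp] at h; exact ih h
    | some p =>
      rw [hp] at h
      by_cases hk : PySem.Str.lower (PySem.Str.strip (String.ofList p.1)) = "stress triggers"
      · simpa [hk] using h
      · simp only [hk, if_false] at h ⊢; exact ih h

lemma pvFindTrig_append_none (a b : List String) (h : pvFindTrig a = none) :
    pvFindTrig (a ++ b) = pvFindTrig b := by
  induction a with
  | nil => simp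
  | cons line rest ih =>
    simp only [List.cons_append, pvFindTrig] at h ⊢
    cases hp : pvPartitionColon line.toList with
    | none => rw [hp] at h; exact ih h
    | some p =>
      rw [hp] at h
      by_cases hk : PySem.Str.lower (PySem.Str.strip (String.ofList p.1)) = "stress triggers"
      · simp [hk] at h
      · simp only [hk, if_false] at h ⊢; exact ih h

-- A's last-wins dict entry, re-expressed as a foldl, equals B's first match over the reversed lines
lemma foldl_eq_findTrig_rev (lines : List String) (acc : String) :
    lines.foldl
        (fun triggers line =>
          match pvPartitionColon line.toList with
          | none => triggers
          | some p =>
            if PySem.Str.lower (PySem.Str.strip (String.ofList p.1)) = "stress triggers" then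
              PySem.Str.strip (String.ofList p.2)
            else triggers) acc
      = (pvFindTrig lines.reverse).getD acc := by
  induction lines generalizing acc with
  | nil => simp [pvFindTrig]
  | cons line rest ih =>
    rw [List.foldl_cons, ih, List.reverse_cons]
    cases hf : pvFindTrig rest.reverse with
    | some v => rw [pvFindTrig_append_some _ _ _ hf]; simp
    | none =>
      rw [pvFindTrig_append_none _ _ hf]
      cases hp : pvPartitionColon line.toList with
      | none => simp [pvFindTrig, hp]
      | some p =>
        by_cases hk : PySem.Str.lower (PySem.Str.strip (String.ofList p.1)) = "stress triggers"
        · simp [pvFindTrig, hp, hk]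
        · simp [pvFindTrig, hp, hk]

-- A's dict fold's lookup equals the last-wins foldl over the same lines
lemma triggers_fold (lines : List String) :
    ∀ (d : PySem.Dict String String) (acc : String),
      d.getD "stress triggers" "" = acc →
      ((lines.foldl
        (fun sections line =>
          if PySem.Str.isIn ":" line then
            let p := pvSplit1Colon line.toList
            sections.insert (PySem.Str.lower (PySem.Str.strip (String.ofList p.1)))
                            (PySem.Str.strip (String.ofList p.2))
          else sections) d).getD "stress triggers" "")
      = lines.foldl
          (fun triggers line =>
            match pvPartitionColon line.toList with
            | none => triggers
            | some p =>
              if PySem.Str.lower (PySem.Str.strip (String.ofList p.1)) = "stress triggers" then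
                PySem.Str.strip (String.ofList p.2)
              else triggers) acc := by
  induction lines with
  | nil => intro d acc h; simpa using h
  | cons line rest ih =>
    intro d acc h
    by_cases hin : PySem.Str.isIn ":" line = true
    · have hmem : ':' ∈ line.toList := (isIn_colon line).mp hin
      rw [List.foldl_cons, List.foldl_cons]
      simp only [hin, if_true, pvPartitionColon_mem _ hmem]
      apply ih
      by_cases hk : PySem.Str.lower (PySem.Str.strip (String.ofList (pvSplit1Colon line.toList).1)) = "stress triggers"
      · simp [hk]
      · simp [PySem.Dict.getD_insert, hk, Ne.symm hk, h]
    · have hno : pvPartitionColon line.toList = none :=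
        (pvPartitionColon_none_iff _).mpr (fun hm => hin ((isIn_colon line).mpr hm))
      rw [List.foldl_cons, List.foldl_cons]
      simp only [hin, hno]
      exact ih d acc h

-- ===== VERDICT (by name: the statement is the Claim_ definition above) =====
theorem extract_research_topics_py_spec : Claim_equal_extract_research_topics_py := by
  intro user_profile _
  show extract_research_topics_py user_profile = extract_research_topics_py_alt user_profile
  unfold extract_research_topics_py extract_research_topics_py_alt extract_sections_py
  have htf := triggers_fold (PySem.Str.splitlines user_profile) PySem.Dict.empty "" (by simp)
  simp only [htf, foldl_eq_findTrig_rev]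
  set topics := (((PySem.Str.split?
      ((pvFindTrig (PySem.Str.splitlines user_profile).reverse).getD "") ",").getD []).map
      PySem.Str.strip).filter (fun chunk => decide (chunk ≠ "")) with htopics
  cases topics with
  | nil => decide
  | cons x xs =>
    have h3 : PySem.List.slice (x :: xs) none (some 3) = (x :: xs).take 3 := by
      simpa using PySem.List.slice_to_natCast (x :: xs) 3
    simp [h3, List.take]
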